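-- pv_equiv track=rewrite | github.com/saarthak2002/serverless-mr | mapper_lambda_function.py | user_map_function
-- ===== SOURCE A (Python) =====
-- def user_map_function(k, v):
--     words = []
--     filtered_content = ''.join([char if char.isalpha() or char.isspace() or char == "'" else ' ' for char in v])
--     words.extend(filtered_content.split())
--     kv_list = list()
--     for word in words:
--         kv_list.append((word.lower(), 1))
--     return kv_list
-- ===== SOURCE B (Python) =====
-- def user_map_function(k, v):
--     kv_list = []
--     buf = ''
--     for ch in v:
--         if ch.isalpha() or ch == "'":
--             buf += ch
--         else:
--             if buf:
--                 kv_list.append((buf.lower(), 1))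
--             buf = ''
--     if buf:
--         kv_list.append((buf.lower(), 1))
--     return kv_list
-- ===== Notes on version B (the rewrite author's own statement) =====
-- stated objective: alternative
-- what changed: Replaced A's three-pass pipeline (build a filtered string, str.split(), then a pair-building loop) by a single pass over the characters maintaining a current-token buffer that is flushed as a (lower,1) pair at each separator.
import Mathlib
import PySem

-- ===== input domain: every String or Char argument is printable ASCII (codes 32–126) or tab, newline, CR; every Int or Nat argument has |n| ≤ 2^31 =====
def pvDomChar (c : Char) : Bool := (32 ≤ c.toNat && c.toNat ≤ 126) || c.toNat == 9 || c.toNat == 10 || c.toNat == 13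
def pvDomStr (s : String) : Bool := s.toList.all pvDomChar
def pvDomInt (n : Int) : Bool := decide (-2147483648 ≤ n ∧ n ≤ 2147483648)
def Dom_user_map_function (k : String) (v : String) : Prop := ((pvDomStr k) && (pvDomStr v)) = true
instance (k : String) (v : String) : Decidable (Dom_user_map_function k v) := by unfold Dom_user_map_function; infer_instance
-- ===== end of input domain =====

-- B replaces A's pipeline (filter string, split, pair loop) by a single-pass buffer/flush tokenizer; same cost, different decomposition.


-- ===== PORT A =====
def user_map_function (k : String) (v : String) : List (String × Int) :=
  let words : List (List Char) := []
  let filtered_content : List Char :=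
    PySem.Chars.join []
      (v.toList.map (fun c =>
        if PySem.Chars.isalpha c || PySem.Chars.isspace c || c == '\'' then [c] else [' ']))
  let words := words ++ PySem.Chars.split₀ filtered_content
  let kv_list : List (String × Int) := []
  words.foldl (fun acc w => acc ++ [(String.ofList (PySem.Chars.lower w), 1)]) kv_list

-- ===== PORT B =====
-- the for loop of Source B: state = (kv_list, buf); flush buf on each separator and at the end
def umfAltGo : List Char → List Char → List (String × Int) → List (String × Int)
  | [], buf, res =>
      if buf.isEmpty then res else res ++ [(String.ofList (PySem.Chars.lower buf), 1)]
  | c :: rest, buf, res =>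
      if PySem.Chars.isalpha c || c == '\'' then
        umfAltGo rest (buf ++ [c]) res
      else
        if buf.isEmpty then umfAltGo rest [] res
        else umfAltGo rest [] (res ++ [(String.ofList (PySem.Chars.lower buf), 1)])

def user_map_function_alt (k : String) (v : String) : List (String × Int) :=
  umfAltGo v.toList [] []

-- ===== PRECONDITION & SPEC =====
def Spec_user_map_function (k : String) (v : String) (out : List (String × Int)) : Prop := out = user_map_function_alt k v
instance (k : String) (v : String) (out : List (String × Int)) : Decidable (Spec_user_map_function k v out) := by unfold Spec_user_map_function; infer_instance

-- ===== CLAIM (what is proved, stated in full; the proofs are below) =====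
def Claim_equal_user_map_function : Prop := ∀ (k : String) (v : String), Dom_user_map_function k v → Spec_user_map_function k v (user_map_function k v)

-- ===== LEMMAS AND PROOFS =====

-- A's character substitution
def umfStep (c : Char) : Char :=
  if PySem.Chars.isalpha c || PySem.Chars.isspace c || c == '\'' then c else ' '

def umfToken (w : List Char) : String × Int := (String.ofList (PySem.Chars.lower w), 1)

lemma umfStep_isspace (c : Char) :
    PySem.Chars.isspace (umfStep c) = !(PySem.Chars.isalpha c || c == '\'') := by
  have halpha : PySem.Chars.isalpha c = true → PySem.Chars.isspace c = false := by
    simp only [PySem.Chars.isalpha, PySem.Chars.isupper, PySem.Chars.islower,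
      PySem.Chars.isspace, Char.le_def]
    intro h
    simp only [Bool.or_eq_true, Bool.and_eq_true, decide_eq_true_eq] at h
    have h39 : ('A'.val ≤ c.val ∧ c.val ≤ 'Z'.val) ∨ ('a'.val ≤ c.val ∧ c.val ≤ 'z'.val) := h
    simp only [Bool.or_eq_false_iff, Bool.and_eq_false_iff, decide_eq_false_iff_not]
    have hn : (65 ≤ c.toNat ∧ c.toNat ≤ 90) ∨ (97 ≤ c.toNat ∧ c.toNat ≤ 122) := by
      exact_mod_cast h39
    omega
  by_cases ha : PySem.Chars.isalpha c = true
  · simp [umfStep, ha, halpha ha]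
  · by_cases hq : c = '\''
    · subst hq; decide
    · have hb : (c == '\'') = false := by simp [hq]
      by_cases hs : PySem.Chars.isspace c = true
      · simp [umfStep, ha, hs, hb]
      · simp only [Bool.not_eq_true] at hs
        have hsp : PySem.Chars.isspace ' ' = true := by decide
        simp [umfStep, ha, hs, hb, hsp]

lemma umfStep_of_keep (c : Char) (h : (PySem.Chars.isalpha c || c == '\'') = true) :
    umfStep c = c := by
  unfold umfStep
  rcases Bool.or_eq_true_iff.mp h with h' | h' <;> simp [h']

lemma umfGo_eq (cs : List Char) : ∀ (cur : List Char) (acc : List (List Char)),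
    (PySem.Chars.split₀.go (cs.map umfStep) cur acc).map umfToken
      = umfAltGo cs cur.reverse (acc.reverse.map umfToken) := by
  induction cs with
  | nil =>
    intro cur acc
    simp only [List.map_nil, PySem.Chars.split₀.go, umfAltGo, List.isEmpty_reverse]
    by_cases h : cur.isEmpty
    · simp [h]
    · simp [h, umfToken]
  | cons c rest ih =>
    intro cur acc
    simp only [List.map_cons, PySem.Chars.split₀.go, umfAltGo]
    by_cases hk : (PySem.Chars.isalpha c || c == '\'') = true
    · have hs : PySem.Chars.isspace (umfStep c) = false := by
        rw [umfStep_isspace]; simp [hk]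
      have hs' : PySem.Chars.isspace c = false := by
        rw [← umfStep_of_keep c hk]; exact hs
      rw [umfStep_of_keep c hk]
      simp only [hs', Bool.false_eq_true, if_false, hk, if_true]
      simpa using ih (c :: cur) acc
    · have hs : PySem.Chars.isspace (umfStep c) = true := by
        rw [umfStep_isspace]; simp [hk]
      simp only [hs, if_true, hk, Bool.false_eq_true, if_false, List.isEmpty_reverse]
      by_cases hc : cur.isEmpty
      · simpa [hc] using ih [] acc
      · have := ih [] (cur.reverse :: acc)
        simp only [List.reverse_nil] at this
        simpa [hc, umfToken] using this

lemma umf_filtered (v : List Char) :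
    PySem.Chars.join []
      (v.map (fun c =>
        if PySem.Chars.isalpha c || PySem.Chars.isspace c || c == '\'' then [c] else [' ']))
      = v.map umfStep := by
  have h : (v.map (fun c =>
      if PySem.Chars.isalpha c || PySem.Chars.isspace c || c == '\'' then [c] else [' ']))
      = (v.map umfStep).map (fun c => [c]) := by
    simp only [List.map_map]
    refine List.map_congr_left (fun c _ => ?_)
    by_cases h : (PySem.Chars.isalpha c || PySem.Chars.isspace c || c == '\'') = true
    · simp [umfStep, h]
    · simp [umfStep, h]
  rw [h, PySem.Chars.join_nil_singletons]

-- ===== VERDICT (by name: the statement is the Claim_ definition above) =====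
theorem user_map_function_spec : Claim_equal_user_map_function := by
  intro k v _
  unfold Spec_user_map_function user_map_function user_map_function_alt
  simp only [List.nil_append, umf_filtered, PySem.Chars.split₀,
    PySem.List.foldl_append_singleton_eq_map]
  have := umfGo_eq v.toList [] []
  simpa [umfToken] using this
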